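-- pv_equiv track=rewrite | github.com/edt-yxz-zzd/python3_src | nn_ns/RecognizeSystem/Utils.py | odict_split
-- ===== SOURCE A (Python) =====
-- from collections import OrderedDict, Counter
--
-- def odict_split(odict, key):
--     '''\
-- input: odict::OrderedDict, key
-- assume key in odict
-- output: odict before key, odict after key
-- '''
--     if key not in odict:
--         raise ValueError('key not in odict')
--     before = OrderedDict()
--     after = OrderedDict()
--     d = before
--     for k, v in odict.items():
--         if k == key:
--             d = after
--             continue
--         d[k] = v
--     return before, after
-- ===== SOURCE B (Python) =====
-- from collections import OrderedDict
--
--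
-- def odict_split(odict, key):
--     if key not in odict:
--         raise ValueError('key not in odict')
--     items = list(odict.items())
--     idx = next(i for i, (k, _) in enumerate(items) if k == key)
--     return OrderedDict(items[:idx]), OrderedDict(items[idx + 1:])
-- ===== Notes on version B (the rewrite author's own statement) =====
-- stated objective: simpler
-- what changed: Replaces the flag-switching loop that mutates one of two growing dicts with a locate-then-slice decomposition: find the split index once, then build the result from items[:idx] and items[idx+1:].
import Mathlib
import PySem

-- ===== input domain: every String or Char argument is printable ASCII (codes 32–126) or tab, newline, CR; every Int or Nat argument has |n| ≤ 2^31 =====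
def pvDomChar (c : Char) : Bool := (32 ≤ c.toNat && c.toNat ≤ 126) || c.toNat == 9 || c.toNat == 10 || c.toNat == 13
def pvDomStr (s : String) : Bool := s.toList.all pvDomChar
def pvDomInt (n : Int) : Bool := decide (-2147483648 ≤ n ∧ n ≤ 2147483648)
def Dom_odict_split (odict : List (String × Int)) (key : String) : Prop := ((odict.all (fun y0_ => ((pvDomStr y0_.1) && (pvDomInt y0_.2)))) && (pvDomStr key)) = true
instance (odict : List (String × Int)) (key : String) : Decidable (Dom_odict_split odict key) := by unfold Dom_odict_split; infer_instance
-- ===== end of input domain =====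

-- B replaces A's flag-switching mutating loop with a locate-then-slice decomposition (same cost, simpler shape).

-- ===== PORT A =====
-- A's loop step: current state is (before, after, d-is-after flag)
def odictSplitStepA (key : String)
    (st : (List (String × Int)) × (List (String × Int)) × Bool) (kv : String × Int) :
    (List (String × Int)) × (List (String × Int)) × Bool :=
  if kv.1 == key then (st.1, st.2.1, true)
  else if st.2.2 then (st.1, st.2.1 ++ [kv], true)
  else (st.1 ++ [kv], st.2.1, false)

def odict_split (odict : List (String × Int)) (key : String) : (List (String × Int)) × (List (String × Int)) :=
  if (odict.map Prod.fst).contains key = false then ([], [])  -- Python: raise ValueError (outside Pre_)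
  else
    let st := odict.foldl (odictSplitStepA key) ([], [], false)
    (st.1, st.2.1)

-- ===== PORT B =====
def odict_split_alt (odict : List (String × Int)) (key : String) : (List (String × Int)) × (List (String × Int)) :=
  match PySem.List.index? (odict.map Prod.fst) key with
  | none => ([], [])  -- Python: raise ValueError (outside Pre_)
  | some idx =>
      (PySem.List.slice odict none (some (idx : Int)),
       PySem.List.slice odict (some ((idx : Int) + 1)) none)

-- ===== PRECONDITION & SPEC =====
-- Pre_ excludes (a) inputs where A raises ValueError (key absent) and (b) association lists with
-- duplicate keys, which do not denote a unique OrderedDict (the Python receives the collapsed dict).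
def Pre_odict_split (odict : List (String × Int)) (key : String) : Prop :=
  key ∈ odict.map Prod.fst ∧ (odict.map Prod.fst).Nodup
instance (odict : List (String × Int)) (key : String) : Decidable (Pre_odict_split odict key) := by
  unfold Pre_odict_split; infer_instance

def pvWitness_odict_split : (List (String × Int)) × String := ([("a", 1), ("b", 2), ("c", 3)], "b")

def Spec_odict_split (odict : List (String × Int)) (key : String) (out : (List (String × Int)) × (List (String × Int))) : Prop := out = odict_split_alt odict key
instance (odict : List (String × Int)) (key : String) (out : (List (String × Int)) × (List (String × Int))) : Decidable (Spec_odict_split odict key out) := by unfold Spec_odict_split; infer_instance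

-- ===== CLAIM (what is proved, stated in full; the proofs are below) =====
def Claim_equal_odict_split : Prop := ∀ (odict : List (String × Int)) (key : String), Dom_odict_split odict key → Pre_odict_split odict key → Spec_odict_split odict key (odict_split odict key)

-- ===== LEMMAS AND PROOFS =====

-- once the flag is set, the remaining items (none equal to key) all go to `after`
theorem foldA_after (key : String) (l : List (String × Int))
    (h : key ∉ l.map Prod.fst) (b a : List (String × Int)) :
    l.foldl (odictSplitStepA key) (b, a, true) = (b, a ++ l, true) := by
  induction l generalizing a with
  | nil => simp
  | cons kv rest ih =>
      simp only [List.map_cons, List.mem_cons, not_or] at h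
      have hne : (kv.1 == key) = false := by
        simp [beq_eq_false_iff_ne]; exact fun e => h.1 e.symm
      simp [List.foldl_cons, odictSplitStepA, hne, ih h.2]

-- before the flag is set: if key first occurs at index i, the fold splits at i
theorem foldA_split (key : String) (l : List (String × Int)) (i : Nat)
    (hnd : (l.map Prod.fst).Nodup)
    (hidx : PySem.List.index? (l.map Prod.fst) key = some i)
    (b : List (String × Int)) :
    l.foldl (odictSplitStepA key) (b, [], false) = (b ++ l.take i, l.drop (i + 1), true) := by
  induction l generalizing b i with
  | nil => simp [PySem.List.index?, List.idxOf?] at hidx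
  | cons kv rest ih =>
      simp only [List.map_cons] at hidx
      simp only [List.map_cons, List.nodup_cons] at hnd
      by_cases hk : kv.1 = key
      · have h0 : i = 0 := by
          rw [hk, PySem.List.index?_cons_self] at hidx
          exact (Option.some_inj.mp hidx).symm
        subst h0
        have hrest : key ∉ rest.map Prod.fst := hk ▸ hnd.1
        simp [List.foldl_cons, odictSplitStepA, hk, foldA_after key rest hrest]
      · have hstep : PySem.List.index? (rest.map Prod.fst) key = some (i - 1) ∧ 1 ≤ i := by
          rw [PySem.List.index?_cons_of_ne (rest.map Prod.fst) hk] at hidx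
          rcases Option.map_eq_some_iff.mp hidx with ⟨j, hj, hji⟩
          constructor
          · rw [hj]; congr 1; omega
          · omega
        have hne : (kv.1 == key) = false := by simp [beq_eq_false_iff_ne, hk]
        have := ih (i - 1) hnd.2 hstep.1 (b ++ [kv])
        simp only [List.foldl_cons, odictSplitStepA, hne, if_false, Bool.false_eq_true] at *
        rw [this]
        have hi : i = (i - 1) + 1 := by omega
        rw [hi]
        simp [List.take_succ_cons, List.drop_succ_cons]

-- ===== VERDICT (by name: the statement is the Claim_ definition above) =====
theorem odict_split_spec : Claim_equal_odict_split := by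
  intro odict key _ hpre
  obtain ⟨hmem, hnd⟩ := hpre
  obtain ⟨i, hi⟩ := Option.isSome_iff_exists.mp
    ((PySem.List.index?_isSome_iff _ _).mpr hmem)
  have hcont : (odict.map Prod.fst).contains key = true := by
    simpa [List.contains_iff_mem] using hmem
  unfold Spec_odict_split odict_split odict_split_alt
  rw [hi, hcont]
  simp only [Bool.true_eq_false, if_false]
  rw [foldA_split key odict i hnd hi []]
  have h1 : PySem.List.slice odict none (some (i : Int)) = odict.take i :=
    PySem.List.slice_to_natCast odict i
  have h2 : PySem.List.slice odict (some ((i : Int) + 1)) none = odict.drop (i + 1) := by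
    have : ((i : Int) + 1) = ((i + 1 : Nat) : Int) := by push_cast; ring
    rw [this, PySem.List.slice_from_natCast]
  simp [h1, h2]
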